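-- pv_equiv track=rewrite | github.com/pypi-data/pypi-mirror-404 | packages/oscura/oscura-0.8.0.tar.gz/oscura-0.8.0/src/oscura/reporting/citations.py | auto_cite_measurement
-- ===== SOURCE A (Python) =====
-- def auto_cite_measurement(measurement_name: str) -> str | None:
--     """Automatically determine which IEEE standard to cite for a measurement.
--
--     Args:
--         measurement_name: Name of measurement (e.g., "rise_time", "snr").
--
--     Returns:
--         Standard ID to cite, or None if no match.
--
--     Example:
--         >>> auto_cite_measurement("rise_time")
--         '181'
--         >>> auto_cite_measurement("snr")
--         '1241'
--         >>> auto_cite_measurement("jitter")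
--         '2414'
--     """
--     measurement_lower = measurement_name.lower()
--
--     # Pulse/waveform measurements -> IEEE 181
--     if any(
--         term in measurement_lower
--         for term in [
--             "rise",
--             "fall",
--             "pulse",
--             "transition",
--             "overshoot",
--             "settling",
--             "slew",
--         ]
--     ):
--         return "181"
--
--     # ADC/quantization measurements -> IEEE 1241
--     if any(
--         term in measurement_lower
--         for term in ["snr", "sinad", "enob", "thd", "sfdr", "quantization"]
--     ):
--         return "1241"
--
--     # Jitter measurements -> IEEE 2414
--     if any(term in measurement_lower for term in ["jitter", "phase_noise", "timing"]):
--         return "2414"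
--
--     # Power measurements -> IEEE 1459
--     if any(term in measurement_lower for term in ["power", "rms", "thd", "distortion", "harmonic"]):
--         return "1459"
--
--     # Oscilloscope/digitizer -> IEEE 1057
--     if any(
--         term in measurement_lower for term in ["bandwidth", "sample_rate", "resolution", "accuracy"]
--     ):
--         return "1057"
--
--     return None
-- ===== SOURCE B (Python) =====
-- # Flat keyword table with category ranks: one pass keeps the minimum matching
-- # rank (category priority), then the rank is translated to a standard id.
-- TABLE = [
--     ("rise", 0), ("fall", 0), ("pulse", 0), ("transition", 0),
--     ("overshoot", 0), ("settling", 0), ("slew", 0),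
--     ("snr", 1), ("sinad", 1), ("enob", 1), ("thd", 1), ("sfdr", 1),
--     ("quantization", 1),
--     ("jitter", 2), ("phase_noise", 2), ("timing", 2),
--     ("power", 3), ("rms", 3), ("thd", 3), ("distortion", 3), ("harmonic", 3),
--     ("bandwidth", 4), ("sample_rate", 4), ("resolution", 4), ("accuracy", 4),
-- ]
--
-- STANDARDS = ["181", "1241", "2414", "1459", "1057"]
--
--
-- def auto_cite_measurement(measurement_name: str) -> str | None:
--     name = measurement_name.lower()
--     best = None
--     for term, rank in TABLE:
--         if term in name and (best is None or rank < best):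
--             best = rank
--     return None if best is None else STANDARDS[best]
-- ===== Notes on version B (the rewrite author's own statement) =====
-- stated objective: alternative
-- what changed: Instead of five chained early-return branches, B does one full pass over a flat keyword table maintaining the minimum matching category rank and then indexes a standards list with that rank; the duplicate keyword shared by two categories is resolved by the minimum, not by branch order.
import Mathlib
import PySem

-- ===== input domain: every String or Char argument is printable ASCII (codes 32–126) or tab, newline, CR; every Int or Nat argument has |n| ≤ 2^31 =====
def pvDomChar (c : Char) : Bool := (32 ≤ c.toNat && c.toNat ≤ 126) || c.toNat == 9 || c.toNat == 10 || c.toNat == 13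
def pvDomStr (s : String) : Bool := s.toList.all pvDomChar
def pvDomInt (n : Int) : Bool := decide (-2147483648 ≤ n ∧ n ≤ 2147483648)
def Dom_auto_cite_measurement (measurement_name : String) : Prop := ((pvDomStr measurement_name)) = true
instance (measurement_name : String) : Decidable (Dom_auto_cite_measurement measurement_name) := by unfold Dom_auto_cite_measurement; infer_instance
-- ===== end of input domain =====

-- B: one pass over a flat keyword table keeping the minimum matching category rank, then a table lookup (alternative decomposition; same cost).


-- ===== PORT A =====
def auto_cite_measurement (measurement_name : String) : Option String :=
  let measurement_lower := PySem.Str.lower measurement_name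
  if (["rise", "fall", "pulse", "transition", "overshoot", "settling", "slew"].any
      (fun term => PySem.Str.isIn term measurement_lower)) then some "181"
  else if (["snr", "sinad", "enob", "thd", "sfdr", "quantization"].any
      (fun term => PySem.Str.isIn term measurement_lower)) then some "1241"
  else if (["jitter", "phase_noise", "timing"].any
      (fun term => PySem.Str.isIn term measurement_lower)) then some "2414"
  else if (["power", "rms", "thd", "distortion", "harmonic"].any
      (fun term => PySem.Str.isIn term measurement_lower)) then some "1459"
  else if (["bandwidth", "sample_rate", "resolution", "accuracy"].any
      (fun term => PySem.Str.isIn term measurement_lower)) then some "1057"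
  else none

-- ===== PORT B =====
def pvTable : List (String × Nat) :=
  [("rise", 0), ("fall", 0), ("pulse", 0), ("transition", 0),
   ("overshoot", 0), ("settling", 0), ("slew", 0),
   ("snr", 1), ("sinad", 1), ("enob", 1), ("thd", 1), ("sfdr", 1),
   ("quantization", 1),
   ("jitter", 2), ("phase_noise", 2), ("timing", 2),
   ("power", 3), ("rms", 3), ("thd", 3), ("distortion", 3), ("harmonic", 3),
   ("bandwidth", 4), ("sample_rate", 4), ("resolution", 4), ("accuracy", 4)]

def pvStandards : List String := ["181", "1241", "2414", "1459", "1057"]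

def auto_cite_measurement_alt (measurement_name : String) : Option String :=
  let name := PySem.Str.lower measurement_name
  let best := pvTable.foldl
    (fun best t =>
      if PySem.Str.isIn t.1 name && (match best with
          | none => true
          | some b => decide (t.2 < b)) then some t.2 else best)
    (none : Option Nat)
  match best with
  | none => none
  | some b => PySem.List.pyGet? pvStandards (Int.ofNat b)  -- STANDARDS[best]; always in range

-- ===== PRECONDITION & SPEC =====
def Spec_auto_cite_measurement (measurement_name : String) (out : Option String) : Prop := out = auto_cite_measurement_alt measurement_name
instance (measurement_name : String) (out : Option String) : Decidable (Spec_auto_cite_measurement measurement_name out) := by unfold Spec_auto_cite_measurement; infer_instance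

-- ===== CLAIM (what is proved, stated in full; the proofs are below) =====
def Claim_equal_auto_cite_measurement : Prop := ∀ (measurement_name : String), Dom_auto_cite_measurement measurement_name → Spec_auto_cite_measurement measurement_name (auto_cite_measurement measurement_name)

-- ===== LEMMAS AND PROOFS =====

-- the fold's step function (definitionally the lambda inside auto_cite_measurement_alt)
def pvStepFn (n : String) (best : Option Nat) (t : String × Nat) : Option Nat :=
  if PySem.Str.isIn t.1 n && (match best with
      | none => true
      | some b => decide (t.2 < b)) then some t.2 else best

lemma pv_fold_stay (n : String) (r : Nat) (l : List (String × Nat))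
    (h : ∀ p ∈ l, r ≤ p.2) : l.foldl (pvStepFn n) (some r) = some r := by
  induction l with
  | nil => rfl
  | cons p rest ih =>
    have hp : r ≤ p.2 := h p (List.mem_cons_self ..)
    have hstep : pvStepFn n (some r) p = some r := by
      unfold pvStepFn
      rw [show (match (some r : Option Nat) with
            | none => true
            | some b => decide (p.2 < b)) = decide (p.2 < r) from rfl,
          decide_eq_false (Nat.not_lt.mpr hp), Bool.and_false]
      simp
    rw [List.foldl_cons, hstep]
    exact ih (fun q hq => h q (List.mem_cons_of_mem _ hq))

lemma pv_fold_block (n : String) (r : Nat) (l : List (String × Nat))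
    (h : ∀ p ∈ l, p.2 = r) :
    l.foldl (pvStepFn n) none =
      (if l.any (fun p => PySem.Str.isIn p.1 n) then some r else none) := by
  induction l with
  | nil => rfl
  | cons p rest ih =>
    have hp : p.2 = r := h p (List.mem_cons_self ..)
    have hrest : ∀ q ∈ rest, q.2 = r := fun q hq => h q (List.mem_cons_of_mem _ hq)
    by_cases hb : PySem.Str.isIn p.1 n
    · have hstep : pvStepFn n none p = some r := by
        unfold pvStepFn; rw [hb]; show some p.2 = some r; rw [hp]
      rw [List.foldl_cons, hstep, pv_fold_stay n r rest (fun q hq => (hrest q hq).ge),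
          List.any_cons, hb, Bool.true_or, if_pos rfl]
    · rw [Bool.not_eq_true] at hb
      have hstep : pvStepFn n none p = none := by unfold pvStepFn; rw [hb]; rfl
      rw [List.foldl_cons, hstep, ih hrest, List.any_cons, hb, Bool.false_or]

-- pvTable split into its five constant-rank blocks
def pvB0 : List (String × Nat) :=
  [("rise", 0), ("fall", 0), ("pulse", 0), ("transition", 0),
   ("overshoot", 0), ("settling", 0), ("slew", 0)]
def pvB1 : List (String × Nat) :=
  [("snr", 1), ("sinad", 1), ("enob", 1), ("thd", 1), ("sfdr", 1), ("quantization", 1)]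
def pvB2 : List (String × Nat) := [("jitter", 2), ("phase_noise", 2), ("timing", 2)]
def pvB3 : List (String × Nat) :=
  [("power", 3), ("rms", 3), ("thd", 3), ("distortion", 3), ("harmonic", 3)]
def pvB4 : List (String × Nat) :=
  [("bandwidth", 4), ("sample_rate", 4), ("resolution", 4), ("accuracy", 4)]

lemma pv_table_split : pvTable = pvB0 ++ pvB1 ++ pvB2 ++ pvB3 ++ pvB4 := by rfl

lemma pv_fold_block_ge (n : String) (r r' : Nat) (l : List (String × Nat))
    (h : ∀ p ∈ l, p.2 = r') (hr : r ≤ r') :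
    l.foldl (pvStepFn n) (some r) = some r :=
  pv_fold_stay n r l (fun p hp => (h p hp) ▸ hr)

lemma pv_main (n : String) :
    (if (["rise", "fall", "pulse", "transition", "overshoot", "settling", "slew"].any
        (fun term => PySem.Str.isIn term n)) then some "181"
    else if (["snr", "sinad", "enob", "thd", "sfdr", "quantization"].any
        (fun term => PySem.Str.isIn term n)) then some "1241"
    else if (["jitter", "phase_noise", "timing"].any
        (fun term => PySem.Str.isIn term n)) then some "2414"
    else if (["power", "rms", "thd", "distortion", "harmonic"].any
        (fun term => PySem.Str.isIn term n)) then some "1459"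
    else if (["bandwidth", "sample_rate", "resolution", "accuracy"].any
        (fun term => PySem.Str.isIn term n)) then some "1057"
    else none)
    = (match pvTable.foldl (pvStepFn n) none with
       | none => (none : Option String)
       | some b => PySem.List.pyGet? pvStandards (Int.ofNat b)) := by
  rw [pv_table_split]
  simp only [List.foldl_append]
  have h0 : ∀ p ∈ pvB0, p.2 = 0 := by decide
  have h1 : ∀ p ∈ pvB1, p.2 = 1 := by decide
  have h2 : ∀ p ∈ pvB2, p.2 = 2 := by decide
  have h3 : ∀ p ∈ pvB3, p.2 = 3 := by decide
  have h4 : ∀ p ∈ pvB4, p.2 = 4 := by decide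
  have e0 : pvB0.any (fun p => PySem.Str.isIn p.1 n)
      = (["rise", "fall", "pulse", "transition", "overshoot", "settling", "slew"].any
          (fun term => PySem.Str.isIn term n)) := by simp [pvB0, List.any]
  have e1 : pvB1.any (fun p => PySem.Str.isIn p.1 n)
      = (["snr", "sinad", "enob", "thd", "sfdr", "quantization"].any
          (fun term => PySem.Str.isIn term n)) := by simp [pvB1, List.any]
  have e2 : pvB2.any (fun p => PySem.Str.isIn p.1 n)
      = (["jitter", "phase_noise", "timing"].any
          (fun term => PySem.Str.isIn term n)) := by simp [pvB2, List.any]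
  have e3 : pvB3.any (fun p => PySem.Str.isIn p.1 n)
      = (["power", "rms", "thd", "distortion", "harmonic"].any
          (fun term => PySem.Str.isIn term n)) := by simp [pvB3, List.any]
  have e4 : pvB4.any (fun p => PySem.Str.isIn p.1 n)
      = (["bandwidth", "sample_rate", "resolution", "accuracy"].any
          (fun term => PySem.Str.isIn term n)) := by simp [pvB4, List.any]
  by_cases c0 : (["rise", "fall", "pulse", "transition", "overshoot", "settling", "slew"].any (fun term => PySem.Str.isIn term n))
  · rw [pv_fold_block n 0 pvB0 h0, e0, if_pos c0, if_pos c0,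
        pv_fold_block_ge n 0 1 pvB1 h1 (by omega),
        pv_fold_block_ge n 0 2 pvB2 h2 (by omega),
        pv_fold_block_ge n 0 3 pvB3 h3 (by omega),
        pv_fold_block_ge n 0 4 pvB4 h4 (by omega)]
    rfl
  · rw [pv_fold_block n 0 pvB0 h0, e0, if_neg c0, if_neg c0]
    by_cases c1 : (["snr", "sinad", "enob", "thd", "sfdr", "quantization"].any (fun term => PySem.Str.isIn term n))
    · rw [pv_fold_block n 1 pvB1 h1, e1, if_pos c1, if_pos c1,
          pv_fold_block_ge n 1 2 pvB2 h2 (by omega),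
          pv_fold_block_ge n 1 3 pvB3 h3 (by omega),
          pv_fold_block_ge n 1 4 pvB4 h4 (by omega)]
      rfl
    · rw [pv_fold_block n 1 pvB1 h1, e1, if_neg c1, if_neg c1]
      by_cases c2 : (["jitter", "phase_noise", "timing"].any (fun term => PySem.Str.isIn term n))
      · rw [pv_fold_block n 2 pvB2 h2, e2, if_pos c2, if_pos c2,
            pv_fold_block_ge n 2 3 pvB3 h3 (by omega),
            pv_fold_block_ge n 2 4 pvB4 h4 (by omega)]
        rfl
      · rw [pv_fold_block n 2 pvB2 h2, e2, if_neg c2, if_neg c2]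
        by_cases c3 : (["power", "rms", "thd", "distortion", "harmonic"].any (fun term => PySem.Str.isIn term n))
        · rw [pv_fold_block n 3 pvB3 h3, e3, if_pos c3, if_pos c3,
              pv_fold_block_ge n 3 4 pvB4 h4 (by omega)]
          rfl
        · rw [pv_fold_block n 3 pvB3 h3, e3, if_neg c3, if_neg c3]
          by_cases c4 : (["bandwidth", "sample_rate", "resolution", "accuracy"].any (fun term => PySem.Str.isIn term n))
          · rw [pv_fold_block n 4 pvB4 h4, e4, if_pos c4, if_pos c4]
            rfl
          · rw [pv_fold_block n 4 pvB4 h4, e4, if_neg c4, if_neg c4]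

-- ===== VERDICT (by name: the statement is the Claim_ definition above) =====
theorem auto_cite_measurement_spec : Claim_equal_auto_cite_measurement := by
  intro s _
  unfold Spec_auto_cite_measurement auto_cite_measurement auto_cite_measurement_alt
  exact pv_main (PySem.Str.lower s)
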